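-- pv_equiv track=rewrite | github.com/Bhupendra560/Employee_Algo | timecard_algo.py | check_consecutive_days
-- ===== SOURCE A (Python) =====
-- def check_consecutive_days(data, consecutive_limit):
--     num = data[0] - 1
--     count = 0
--     # checking for consecutive days in filtered data containing unique digits
--     for i in data:
--         if i - num == 1:
--             count += 1
--         else:
--             count = 1  # Reset count if not consecutive
--         num = i
--         if count == consecutive_limit:
--             return True
--     return count == consecutive_limit
-- ===== SOURCE B (Python) =====
-- def check_consecutive_days(data, consecutive_limit):
--     k = consecutive_limit
--     if k < 1:
--         return False
--     return any(all(data[i + j] == data[i] + j for j in range(k))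
--                for i in range(len(data) - k + 1))
-- ===== Notes on version B (the rewrite author's own statement) =====
-- stated objective: alternative
-- what changed: B drops A's running-count scan entirely: it directly tests each window of length consecutive_limit for being an arithmetic +1 sequence with a brute-force any/all over window start positions, after one arithmetic guard for non-positive limits.
import Mathlib
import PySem

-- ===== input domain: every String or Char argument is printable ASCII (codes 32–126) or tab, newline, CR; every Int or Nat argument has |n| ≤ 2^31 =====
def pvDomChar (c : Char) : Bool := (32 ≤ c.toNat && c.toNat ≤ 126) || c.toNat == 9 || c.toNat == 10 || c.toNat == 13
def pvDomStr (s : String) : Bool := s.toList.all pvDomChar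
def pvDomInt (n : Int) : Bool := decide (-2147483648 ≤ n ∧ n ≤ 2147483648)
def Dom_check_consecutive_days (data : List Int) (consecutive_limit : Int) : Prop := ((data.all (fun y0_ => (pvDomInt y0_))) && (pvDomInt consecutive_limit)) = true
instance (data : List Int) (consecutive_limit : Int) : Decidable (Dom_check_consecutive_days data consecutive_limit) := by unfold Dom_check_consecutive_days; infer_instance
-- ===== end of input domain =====

-- B replaces A's running-count scan by a brute-force any/all test of every window of length consecutive_limit for being a +1 arithmetic run (objective: alternative; return value only).
-- ===== PORT A =====
def goA (l : List Int) (num count limit : Int) : Bool :=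
  match l with
  | [] => count == limit
  | i :: rest =>
    let count' := if i - num == 1 then count + 1 else 1
    if count' == limit then true else goA rest i count' limit

def check_consecutive_days (data : List Int) (consecutive_limit : Int) : Bool :=
  match data with
  | [] => false   -- data[0] raises IndexError in Python; excluded by Pre_
  | d0 :: _ => goA data (d0 - 1) 0 consecutive_limit

-- ===== PORT B =====
def check_consecutive_days_alt (data : List Int) (consecutive_limit : Int) : Bool :=
  let k := consecutive_limit
  if k < 1 then false
  else (PySem.List.pyRange 0 ((data.length : Int) - k + 1) 1).any (fun i =>
    (PySem.List.pyRange 0 k 1).all (fun j =>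
      PySem.List.pyGet? data (i + j) == (PySem.List.pyGet? data i).map (· + j)))

-- ===== PRECONDITION & SPEC =====
-- Pre_ excludes only the empty list, on which A raises IndexError.
def Pre_check_consecutive_days (data : List Int) (consecutive_limit : Int) : Prop := data ≠ []
instance (data : List Int) (consecutive_limit : Int) : Decidable (Pre_check_consecutive_days data consecutive_limit) := by unfold Pre_check_consecutive_days; infer_instance
def pvWitness_check_consecutive_days : List Int × Int := ([3, 4, 5, 9], 3)

def Spec_check_consecutive_days (data : List Int) (consecutive_limit : Int) (out : Bool) : Prop := out = check_consecutive_days_alt data consecutive_limit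
instance (data : List Int) (consecutive_limit : Int) (out : Bool) : Decidable (Spec_check_consecutive_days data consecutive_limit out) := by unfold Spec_check_consecutive_days; infer_instance

-- ===== CLAIM (what is proved, stated in full; the proofs are below) =====
def Claim_equal_check_consecutive_days : Prop := ∀ (data : List Int) (consecutive_limit : Int), Dom_check_consecutive_days data consecutive_limit → Pre_check_consecutive_days data consecutive_limit → Spec_check_consecutive_days data consecutive_limit (check_consecutive_days data consecutive_limit)

-- ===== LEMMAS AND PROOFS =====
-- trace of the successive values A's count takes (final base value included for the final check)
def traceA : List Int → Int → Int → List Int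
  | [], _, c => [c]
  | i :: rest, num, c =>
    let c' := if i - num = 1 then c + 1 else 1
    c' :: traceA rest i c'

-- length of the prefix of l that continues the +1 run from num
def climb : List Int → Int → Int
  | [], _ => 0
  | i :: rest, num => if i - num = 1 then 1 + climb rest i else 0

-- best run length among runs of l that start with a reset relative to num
def rb : List Int → Int → Int
  | [], _ => 0
  | i :: rest, num => if i - num = 1 then rb rest i else max (1 + climb rest i) (rb rest i)

-- length of the maximal +1 run starting at the head of l
def run : List Int → Int
  | [] => 0
  | x :: r => 1 + climb r x

-- max of run over all suffixes
def F : List Int → Int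
  | [] => 0
  | x :: r => max (run (x :: r)) (F r)

theorem climb_nonneg (l : List Int) (num : Int) : 0 ≤ climb l num := by
  induction l generalizing num with
  | nil => simp [climb]
  | cons i rest ih =>
    simp only [climb]; split
    · linarith [ih i]
    · omega

theorem rb_nonneg (l : List Int) (num : Int) : 0 ≤ rb l num := by
  induction l generalizing num with
  | nil => simp [rb]
  | cons i rest ih =>
    simp only [rb]; split
    · exact ih i
    · have := climb_nonneg rest i; have := ih i
      simp only [max_def]; split_ifs <;> omega

theorem goA_iff (l : List Int) (num c limit : Int) :
    goA l num c limit = true ↔ limit ∈ traceA l num c := by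
  induction l generalizing num c with
  | nil =>
    simp only [goA, traceA, List.mem_singleton, beq_iff_eq]
    exact eq_comm
  | cons i rest ih =>
    by_cases h : i - num = 1
    · have h1 : (i - num == 1) = true := by simpa using h
      simp only [goA, traceA, h, h1, List.mem_cons, ih]
      simp only [if_true, beq_iff_eq, Bool.if_true_left, Bool.or_eq_true, decide_eq_true_eq]
      exact or_congr eq_comm (ih i (c + 1))
    · have h1 : (i - num == 1) = false := by simpa using h
      simp only [goA, traceA, h, h1, List.mem_cons, ih]
      simp only [if_false, beq_iff_eq, Bool.if_true_left, Bool.or_eq_true, decide_eq_true_eq,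
        Bool.false_eq_true]
      exact or_congr eq_comm (ih i 1)

theorem mem_traceA (l : List Int) (num c x : Int) (hl : l ≠ []) :
    x ∈ traceA l num c ↔
      (c + 1 ≤ x ∧ x ≤ c + climb l num ∧ 1 ≤ climb l num) ∨ (1 ≤ x ∧ x ≤ rb l num) := by
  induction l generalizing num c with
  | nil => exact absurd rfl hl
  | cons i rest ih =>
    by_cases h : i - num = 1
    · simp only [traceA, climb, rb, List.mem_cons, h, if_pos, if_true]
      cases rest with
      | nil =>
        simp [traceA, climb, rb]
        omega
      | cons j r2 =>
        rw [ih i (c + 1) (by simp)]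
        have h1 := climb_nonneg (j :: r2) i
        have h2 := rb_nonneg (j :: r2) i
        constructor
        · rintro (rfl | ⟨h3, h4, h5⟩ | h3)
          · left; omega
          · left; omega
          · right; exact h3
        · rintro (⟨h3, h4, _⟩ | h3)
          · rcases eq_or_lt_of_le h3 with rfl | h5
            · left; rfl
            · right; left; omega
          · right; right; exact h3
    · simp only [traceA, climb, rb, List.mem_cons]
      rw [if_neg h, if_neg h, if_neg h]
      have h1 := climb_nonneg rest i
      have h2 := rb_nonneg rest i
      have hmax : max (1 + climb rest i) (rb rest i) =
          if 1 + climb rest i ≤ rb rest i then rb rest i else 1 + climb rest i := max_def _ _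
      cases rest with
      | nil =>
        simp [traceA, climb, rb]
        omega
      | cons j r2 =>
        rw [ih i 1 (by simp)]
        rw [hmax]
        constructor
        · rintro (rfl | ⟨h3, h4, h5⟩ | ⟨h3, h4⟩)
          · right; constructor
            · omega
            · split_ifs <;> omega
          · right; refine ⟨by omega, ?_⟩
            split_ifs <;> omega
          · right; refine ⟨by omega, ?_⟩
            split_ifs <;> omega
        · rintro (⟨h3, h4, h5⟩ | ⟨h3, h4⟩)
          · omega
          · split_ifs at h4 with h6
            · rcases eq_or_lt_of_le h3 with rfl | h5
              · left; rfl
              · rcases le_or_gt x (1 + climb (j :: r2) i) with h7 | h7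
                · right; left; omega
                · right; right; omega
            · rcases eq_or_lt_of_le h3 with rfl | h5
              · left; rfl
              · right; left; omega

-- A is true iff 1 ≤ limit ≤ the maximal run length (climb/rb decomposition)
theorem A_iff (d0 : Int) (rest : List Int) (limit : Int) :
    check_consecutive_days (d0 :: rest) limit = true ↔
      1 ≤ limit ∧ limit ≤ max (1 + climb rest d0) (rb rest d0) := by
  have hA : check_consecutive_days (d0 :: rest) limit = goA (d0 :: rest) (d0 - 1) 0 limit := rfl
  rw [hA, goA_iff, mem_traceA (d0 :: rest) (d0 - 1) 0 limit (by simp)]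
  have hcl : climb (d0 :: rest) (d0 - 1) = 1 + climb rest d0 := by simp [climb]
  have hrb : rb (d0 :: rest) (d0 - 1) = rb rest d0 := by simp [rb]
  rw [hcl, hrb]
  have h1 := climb_nonneg rest d0
  have h2 := rb_nonneg rest d0
  have hmax : max (1 + climb rest d0) (rb rest d0)
      = if 1 + climb rest d0 ≤ rb rest d0 then rb rest d0 else 1 + climb rest d0 := max_def _ _
  rw [hmax]
  split_ifs <;> omega

-- F equals the climb/rb maximum
theorem F_eq (x : Int) (rest : List Int) :
    F (x :: rest) = max (1 + climb rest x) (rb rest x) := by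
  induction rest generalizing x with
  | nil => simp [F, run, climb, rb]
  | cons y r2 ih =>
    have ihy := ih y
    simp only [F, run, climb, rb] at ihy ⊢
    have h1 := climb_nonneg r2 y
    have h2 := rb_nonneg r2 y
    simp only [max_def] at ihy ⊢
    split_ifs at ihy ⊢ <;> omega

-- k ≤ F data iff some suffix has run ≥ k (for 1 ≤ k)
theorem F_le_iff (data : List Int) (k : Int) (hk : 1 ≤ k) :
    k ≤ F data ↔ ∃ i : Nat, i < data.length ∧ k ≤ run (data.drop i) := by
  induction data with
  | nil =>
    simp only [F, List.length_nil]
    constructor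
    · intro h; omega
    · rintro ⟨i, hi, _⟩; omega
  | cons x rest ih =>
    simp only [F]
    constructor
    · intro h
      rcases le_max_iff.mp h with h | h
      · exact ⟨0, by simp, by simpa [run] using h⟩
      · rcases ih.mp h with ⟨i, hi, hr⟩
        exact ⟨i + 1, by simpa using hi, by simpa using hr⟩
    · rintro ⟨i, hi, hr⟩
      cases i with
      | zero => exact le_max_of_le_left (by simpa [run] using hr)
      | succ i' =>
        exact le_max_of_le_right (ih.mpr ⟨i', by simpa using hi, by simpa using hr⟩)

-- pointwise characterization of climb
theorem climb_point (r : List Int) (x : Int) (m : Nat) :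
    (↑m ≤ climb r x) ↔ ∀ j : Nat, j < m → r[j]? = some (x + 1 + j) := by
  induction r generalizing x m with
  | nil =>
    simp only [climb, List.getElem?_nil]
    constructor
    · intro h j hj
      exfalso; omega
    · intro h
      cases m with
      | zero => simp
      | succ m' => exact absurd (h 0 (by omega)) (by simp)
  | cons y r2 ih =>
    cases m with
    | zero => simp [climb_nonneg]
    | succ m' =>
      by_cases h : y - x = 1
      · simp only [climb, if_pos h]
        constructor
        · intro hle j hj
          cases j with
          | zero => simp; omega
          | succ j' =>
            have : (↑m' ≤ climb r2 y) := by push_cast at hle ⊢; omega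
            have := (ih y m').mp this j' (by omega)
            simpa [show x + 1 + (↑j' + 1) = y + 1 + ↑j' by omega] using this
        · intro hp
          have : ∀ j : Nat, j < m' → r2[j]? = some (y + 1 + ↑j) := by
            intro j hj
            have := hp (j + 1) (by omega)
            simpa [show x + 1 + (↑j + 1) = y + 1 + ↑j by omega] using this
          have := (ih y m').mpr this
          push_cast; omega
      · simp only [climb, if_neg h]
        constructor
        · intro hle; exfalso; push_cast at hle; omega
        · intro hp
          have := hp 0 (by omega)
          simp at this
          exfalso; omega

theorem climb_le_length (l : List Int) (num : Int) : climb l num ≤ (l.length : Int) := by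
  induction l generalizing num with
  | nil => simp [climb]
  | cons i rest ih =>
    simp only [climb, List.length_cons]
    split
    · have := ih i; push_cast; omega
    · have := climb_nonneg rest i; push_cast; omega

theorem run_le_length (l : List Int) : run l ≤ (l.length : Int) := by
  cases l with
  | nil => simp [run]
  | cons x r => have := climb_le_length r x; simp only [run, List.length_cons]; push_cast; omega

-- the inner 'all' of B tests exactly that the window of length k starting at i is a +1 run
theorem window_iff (data : List Int) (k i : Int) (hk : 1 ≤ k) (h0 : 0 ≤ i)
    (hn : i < (data.length : Int)) :
    ((PySem.List.pyRange 0 k 1).all (fun j =>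
      PySem.List.pyGet? data (i + j) == (PySem.List.pyGet? data i).map (· + j)) = true) ↔
    k ≤ run (data.drop i.toNat) := by
  have hlt : i.toNat < data.length := by omega
  have hx : PySem.List.pyGet? data i = some data[i.toNat] :=
    PySem.List.pyGet?_eq_some_getElem data h0 hn
  have hdrop : data.drop i.toNat = data[i.toNat] :: data.drop (i.toNat + 1) :=
    List.drop_eq_getElem_cons hlt
  rw [hdrop]
  simp only [run]
  rw [List.all_eq_true]
  constructor
  · intro hall
    have hcl : (((k - 1).toNat : Int)) ≤ climb (data.drop (i.toNat + 1)) data[i.toNat] := by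
      rw [climb_point]
      intro j hj
      have hmem : ((j : Int) + 1) ∈ PySem.List.pyRange 0 k 1 := by
        rw [PySem.List.mem_pyRange_one]; omega
      have hthis := hall _ hmem
      simp only [hx, Option.map_some, beq_iff_eq] at hthis
      rw [PySem.List.pyGet?_of_nonneg data (by omega : (0:Int) ≤ i + ((j:Int)+1))] at hthis
      have hidx : (i + ((j : Int) + 1)).toNat = i.toNat + 1 + j := by omega
      rw [hidx] at hthis
      rw [List.getElem?_drop, hthis]
      congr 1
      omega
    omega
  · intro hrun j hjmem
    rw [PySem.List.mem_pyRange_one] at hjmem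
    simp only [hx, Option.map_some, beq_iff_eq]
    have hcl : (((k - 1).toNat : Int)) ≤ climb (data.drop (i.toNat + 1)) data[i.toNat] := by
      omega
    rw [climb_point] at hcl
    rcases eq_or_lt_of_le hjmem.1 with rfl | hj1
    · simp only [add_zero]
      simpa using hx
    · have hj := hcl (j - 1).toNat (by omega)
      rw [List.getElem?_drop] at hj
      rw [PySem.List.pyGet?_of_nonneg data (by omega : (0:Int) ≤ i + j)]
      have hidx : (i + j).toNat = i.toNat + 1 + (j - 1).toNat := by omega
      rw [hidx, hj]
      congr 1
      omega

-- ===== VERDICT (by name: the statement is the Claim_ definition above) =====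
theorem check_consecutive_days_spec : Claim_equal_check_consecutive_days := by
  intro data k _ hpre
  unfold Spec_check_consecutive_days
  cases data with
  | nil => exact absurd rfl hpre
  | cons d0 rest =>
    by_cases hk : k < 1
    · have hb : check_consecutive_days_alt (d0 :: rest) k = false := by
        simp [check_consecutive_days_alt, hk]
      rw [hb]
      cases h : check_consecutive_days (d0 :: rest) k with
      | false => rfl
      | true => exact absurd ((A_iff d0 rest k).mp h) (by omega)
    · rw [not_lt] at hk
      rw [Bool.eq_iff_iff, A_iff, ← F_eq]
      have hB : check_consecutive_days_alt (d0 :: rest) k = true ↔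
          ∃ i : Nat, i < (d0 :: rest).length ∧ k ≤ run ((d0 :: rest).drop i) := by
        simp only [check_consecutive_days_alt, if_neg (by omega : ¬ k < 1)]
        rw [List.any_eq_true]
        constructor
        · rintro ⟨i, hi, hinner⟩
          rw [PySem.List.mem_pyRange_one] at hi
          have hn : i < (((d0 :: rest).length : Nat) : Int) := by omega
          refine ⟨i.toNat, by omega, ?_⟩
          exact (window_iff _ k i hk hi.1 hn).mp hinner
        · rintro ⟨i, hi, hrun⟩
          have hle := run_le_length ((d0 :: rest).drop i)
          rw [List.length_drop] at hle
          have hn : ((i : Int)) < (((d0 :: rest).length : Nat) : Int) := by push_cast; omega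
          refine ⟨(i : Int), ?_, ?_⟩
          · rw [PySem.List.mem_pyRange_one]
            constructor
            · omega
            · push_cast at hle ⊢; omega
          · rw [window_iff _ k (i : Int) hk (by omega) hn]
            simpa using hrun
      rw [hB, F_le_iff _ k hk]
      constructor
      · rintro ⟨_, h⟩; exact h
      · intro h; exact ⟨hk, h⟩
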